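-- pv_equiv track=rewrite | github.com/NguyenDat99/DoAnMale | GiuaKy/Classification/knn.py | n_neighbors
-- ===== SOURCE A (Python) =====
-- def n_neighbors(k):
--     n_neighbors=[]
--     if k==0:
--         for i in range(100):
--             if i%2 !=0:
--                 n_neighbors.append(i)
--     elif k==1:
--         for i in range(100,200):
--             if i%2 !=0:
--                 n_neighbors.append(i)
--     elif k==2:
--         for i in range(200,300):
--             if i%2 !=0:
--                 n_neighbors.append(i)
--     elif k==3:
--         for i in range(300,400):
--             if i%2 !=0:
--                 n_neighbors.append(i)
--     elif k==4:
--         for i in range(400,500):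
--             if i%2 !=0:
--                 n_neighbors.append(i)
--     elif k==5:
--         for i in range(500,600):
--             if i%2 !=0:
--                 n_neighbors.append(i)
--     return n_neighbors
-- ===== SOURCE B (Python) =====
-- def n_neighbors(k):
--     if k in (0, 1, 2, 3, 4, 5):
--         start = int(k) * 100
--         return list(range(start + 1, start + 100, 2))
--     return []
-- ===== Notes on version B (the rewrite author's own statement) =====
-- stated objective: simpler
-- what changed: Collapses the six near-identical branch loops with %2 filters into one membership test plus a single strided range(start+1, start+100, 2).
import Mathlib
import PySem

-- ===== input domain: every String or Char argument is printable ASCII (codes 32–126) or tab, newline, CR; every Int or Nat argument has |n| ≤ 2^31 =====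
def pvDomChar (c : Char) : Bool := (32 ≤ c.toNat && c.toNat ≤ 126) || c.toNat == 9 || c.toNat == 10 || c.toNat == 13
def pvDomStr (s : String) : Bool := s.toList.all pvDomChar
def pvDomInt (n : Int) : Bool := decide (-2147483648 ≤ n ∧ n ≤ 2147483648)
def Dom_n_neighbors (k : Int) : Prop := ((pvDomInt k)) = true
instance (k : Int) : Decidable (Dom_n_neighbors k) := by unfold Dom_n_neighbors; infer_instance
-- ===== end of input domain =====

-- B collapses the six per-branch %2-filter loops into one membership test and a single strided range.
-- ===== PORT A =====
def n_neighbors (k : Int) : List Int :=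
  let acc : List Int := []
  if k == 0 then
    (PySem.List.pyRange 0 100 1).foldl (fun acc i => if i % 2 != 0 then acc ++ [i] else acc) acc
  else if k == 1 then
    (PySem.List.pyRange 100 200 1).foldl (fun acc i => if i % 2 != 0 then acc ++ [i] else acc) acc
  else if k == 2 then
    (PySem.List.pyRange 200 300 1).foldl (fun acc i => if i % 2 != 0 then acc ++ [i] else acc) acc
  else if k == 3 then
    (PySem.List.pyRange 300 400 1).foldl (fun acc i => if i % 2 != 0 then acc ++ [i] else acc) acc
  else if k == 4 then
    (PySem.List.pyRange 400 500 1).foldl (fun acc i => if i % 2 != 0 then acc ++ [i] else acc) acc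
  else if k == 5 then
    (PySem.List.pyRange 500 600 1).foldl (fun acc i => if i % 2 != 0 then acc ++ [i] else acc) acc
  else acc

-- ===== PORT B =====
def n_neighbors_alt (k : Int) : List Int :=
  if k == 0 || k == 1 || k == 2 || k == 3 || k == 4 || k == 5 then
    let start := k * 100
    PySem.List.pyRange (start + 1) (start + 100) 2
  else []

-- ===== PRECONDITION & SPEC =====
def Spec_n_neighbors (k : Int) (out : List Int) : Prop := out = n_neighbors_alt k
instance (k : Int) (out : List Int) : Decidable (Spec_n_neighbors k out) := by unfold Spec_n_neighbors; infer_instance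

-- ===== CLAIM (what is proved, stated in full; the proofs are below) =====
def Claim_equal_n_neighbors : Prop := ∀ (k : Int), Dom_n_neighbors k → Spec_n_neighbors k (n_neighbors k)

-- ===== LEMMAS AND PROOFS =====

-- ===== VERDICT (by name: the statement is the Claim_ definition above) =====
theorem n_neighbors_spec : Claim_equal_n_neighbors := by
  intro k _
  unfold Spec_n_neighbors n_neighbors n_neighbors_alt
  by_cases h0 : k = 0
  · subst h0; decide
  by_cases h1 : k = 1
  · subst h1; decide
  by_cases h2 : k = 2
  · subst h2; decide
  by_cases h3 : k = 3
  · subst h3; decide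
  by_cases h4 : k = 4
  · subst h4; decide
  by_cases h5 : k = 5
  · subst h5; decide
  simp [h0, h1, h2, h3, h4, h5]
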